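-- pv_equiv track=rewrite | github.com/julightzhong10/-Prob_DB | lift.py | check_hiech
-- ===== SOURCE A (Python) =====
-- def check_hiech(q):
--     '''
--     check the if the input is Hierarchical if the query is not self-join and is hierarchical return True, otherwise return False.
--     args:
--         q,  query which only contain single CNF here
--     return:
--         boolean, if Hierarchical return Ture; otherwise False
--     '''
--     Rs_set=set()
--     setdict={}
--     for i in range(len(q)):
--         for j in range(len(q[i])):
--             tmp_opt=q[i][j]
--             tmp_rlat=tmp_opt[0]
--             if tmp_rlat in Rs_set:
--                 return True
--             else:
--                 Rs_set.add(tmp_rlat)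
--                 for z in range(len(tmp_opt[1])):
--                     tmp_var=tmp_opt[1][z]
--                     if tmp_var=='#':
--                         continue
--                     if tmp_var in setdict:
--                         setdict[tmp_var].add(tmp_rlat)
--                     else:
--                         setdict[tmp_var]={tmp_rlat}
--     setlist=[]
--     for key,val in setdict.items():
--         setlist.append(val)
--     for i in range(len(setlist)):
--         for j in range(i+1,len(setlist)):
--             if not (setlist[i].issubset(setlist[j]) or setlist[j].issubset(setlist[i]) or (setlist[i].isdisjoint(setlist[j]))):
--                 return False
--     return True
-- ===== SOURCE B (Python) =====
-- def check_hiech(q):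
--     # Flatten once; any repeated relation name means self-join -> True (as in A).
--     atoms = [atom for clause in q for atom in clause]
--     seen = set()
--     for rel, _ in atoms:
--         if rel in seen:
--             return True
--         seen.add(rel)
--     # var -> set of relations mentioning it ('#' is a placeholder, skipped)
--     setdict = {}
--     for rel, vs in atoms:
--         for v in vs:
--             if v != '#':
--                 setdict.setdefault(v, set()).add(rel)
--     # Laminar-family check without scanning all pairs: only pairs of variable-sets
--     # sharing a relation matter, and those must form a chain under inclusion.
--     byrel = {}
--     for s in setdict.values():
--         for r in s:
--             byrel.setdefault(r, []).append(s)
--     for group in byrel.values():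
--         group.sort(key=len)
--         for a, b in zip(group, group[1:]):
--             if not a <= b:
--                 return False
--     return True
-- ===== Notes on version B (the rewrite author's own statement) =====
-- stated objective: alternative
-- what changed: Replaces A's all-pairs subset/disjoint scan over the variable sets by an inverted relation->sets index: only sets sharing a relation are compared, sorted by size and verified as an inclusion chain via consecutive pairs; the duplicate-relation (self-join) test becomes a separate single pass over the flattened atoms.
import Mathlib
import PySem

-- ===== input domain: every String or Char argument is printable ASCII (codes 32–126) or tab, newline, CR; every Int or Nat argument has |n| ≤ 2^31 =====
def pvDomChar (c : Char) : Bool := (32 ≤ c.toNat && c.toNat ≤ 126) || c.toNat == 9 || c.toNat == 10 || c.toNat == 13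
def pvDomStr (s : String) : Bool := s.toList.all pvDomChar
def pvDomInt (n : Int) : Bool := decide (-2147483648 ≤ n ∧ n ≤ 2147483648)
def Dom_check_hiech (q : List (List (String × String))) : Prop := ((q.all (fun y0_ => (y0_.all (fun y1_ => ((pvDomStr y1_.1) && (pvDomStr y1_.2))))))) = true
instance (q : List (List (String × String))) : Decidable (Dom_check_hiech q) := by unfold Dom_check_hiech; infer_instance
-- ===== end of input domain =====

-- B replaces A's all-pairs nested-or-disjoint scan by a per-relation inclusion-chain check over an
-- inverted relation→variable-sets index (a different algorithm; only intersecting pairs are compared).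


-- ===== PORT A =====
-- inner z-loop of A: add tmp_rlat to setdict[var] for every non-'#' character of the var string
def pvVarsA (r : String) (cs : List Char) (d : PySem.Dict Char (PySem.Set String)) :
    PySem.Dict Char (PySem.Set String) :=
  cs.foldl (fun d c =>
    if c = '#' then d
    else if d.contains c then d.modify c PySem.Set.empty (fun s => PySem.Set.add s r)
    else d.insert c (PySem.Set.add PySem.Set.empty r)) d

-- inner j-loop of A over one clause; `none` = the early `return True` on a repeated relation
def pvClauseA : List (String × String) → PySem.Set String × PySem.Dict Char (PySem.Set String) →
    Option (PySem.Set String × PySem.Dict Char (PySem.Set String))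
  | [], st => some st
  | (r, vs) :: rest, (rs, d) =>
    if PySem.Set.contains rs r then none
    else pvClauseA rest (PySem.Set.add rs r, pvVarsA r vs.toList d)

-- A's i<j double loop with the early `return False`
def pvPairOK (s t : PySem.Set String) : Bool :=
  PySem.Set.issubset s t || PySem.Set.issubset t s || PySem.Set.isdisjoint s t

def pvPairsLoop : List (PySem.Set String) → Bool
  | [] => true
  | s :: rest => rest.all (fun t => pvPairOK s t) && pvPairsLoop rest

def check_hiech (q : List (List (String × String))) : Bool :=
  match q.foldl (fun acc clause => acc.bind (pvClauseA clause))
      (some (PySem.Set.empty, PySem.Dict.empty)) with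
  | none => true
  | some (_, setdict) => pvPairsLoop setdict.values

-- ===== PORT B =====
def pvDupScan : List (String × String) → PySem.Set String → Bool
  | [], _ => false
  | (r, _) :: rest, seen =>
    if PySem.Set.contains seen r then true else pvDupScan rest (PySem.Set.add seen r)

-- setdict.setdefault(v, set()).add(rel): insert {rel} if absent, add rel in place if present = Dict.modify
def pvBuildDict (atoms : List (String × String)) : PySem.Dict Char (PySem.Set String) :=
  atoms.foldl (fun d a =>
    a.2.toList.foldl (fun d c =>
      if c ≠ '#' then d.modify c PySem.Set.empty (fun s => PySem.Set.add s a.1) else d) d)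
    PySem.Dict.empty

-- byrel.setdefault(r, []).append(s) = Dict.modify appending
def pvByRel (sets : List (PySem.Set String)) : PySem.Dict String (List (PySem.Set String)) :=
  sets.foldl (fun b s => s.foldl (fun b r => b.modify r [] (fun g => g ++ [s])) b)
    PySem.Dict.empty

-- group.sort(key=len); all consecutive a <= b
def pvChainOK (g : List (PySem.Set String)) : Bool :=
  let gs := PySem.List.sorted g (fun s => PySem.Set.len s) false
  (gs.zip gs.tail).all (fun p => PySem.Set.issubset p.1 p.2)

def check_hiech_alt (q : List (List (String × String))) : Bool :=
  let atoms := q.flatMap (fun clause => clause)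
  if pvDupScan atoms PySem.Set.empty then true
  else
    let byrel := pvByRel (pvBuildDict atoms).values
    byrel.values.all pvChainOK

-- ===== PRECONDITION & SPEC =====
def Spec_check_hiech (q : List (List (String × String))) (out : Bool) : Prop := out = check_hiech_alt q
instance (q : List (List (String × String))) (out : Bool) : Decidable (Spec_check_hiech q out) := by unfold Spec_check_hiech; infer_instance

-- ===== CLAIM (what is proved, stated in full; the proofs are below) =====
def Claim_equal_check_hiech : Prop := ∀ (q : List (List (String × String))), Dom_check_hiech q → Spec_check_hiech q (check_hiech q)

-- ===== LEMMAS AND PROOFS =====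

-- abbreviations used only by the proofs
def pvComp (s t : PySem.Set String) : Prop := s ⊆ t ∨ t ⊆ s

-- A's double loop is the Pairwise predicate
lemma pvPairsLoop_iff (L : List (PySem.Set String)) :
    pvPairsLoop L = true ↔ List.Pairwise (fun s t => pvPairOK s t = true) L := by
  induction L with
  | nil => simp [pvPairsLoop]
  | cons s rest ih => simp [pvPairsLoop, ih, List.pairwise_cons, List.all_eq_true]

lemma pvClauseA_append (xs ys : List (String × String)) (st) :
    pvClauseA (xs ++ ys) st = (pvClauseA xs st).bind (pvClauseA ys) := by
  induction xs generalizing st with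
  | nil => simp [pvClauseA]
  | cons a rest ih =>
    obtain ⟨rs, d⟩ := st
    obtain ⟨r, vs⟩ := a
    simp only [List.cons_append, pvClauseA]
    split
    · rfl
    · exact ih _

lemma pvFoldA_eq (q : List (List (String × String))) (st) :
    q.foldl (fun acc clause => acc.bind (pvClauseA clause)) (some st)
      = pvClauseA (q.flatMap (fun clause => clause)) st := by
  induction q generalizing st with
  | nil => simp [pvClauseA]
  | cons c rest ih =>
    simp only [List.foldl_cons, List.flatMap_cons, Option.bind_some, pvClauseA_append]
    cases h : pvClauseA c st with
    | none =>
      simp only [Option.bind_none]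
      clear ih h
      induction rest with
      | nil => rfl
      | cons _ _ ih2 => simpa using ih2
    | some st' => simpa using ih st'

lemma pvClauseA_none_iff (atoms : List (String × String)) (rs d) :
    pvClauseA atoms (rs, d) = none ↔ pvDupScan atoms rs = true := by
  induction atoms generalizing rs d with
  | nil => simp [pvClauseA, pvDupScan]
  | cons a rest ih =>
    obtain ⟨r, vs⟩ := a
    simp only [pvClauseA, pvDupScan]
    split
    · simp
    · exact ih _ _

lemma pvClauseA_some (atoms : List (String × String)) (rs d)
    (h : pvDupScan atoms rs = false) :
    ∃ rs', pvClauseA atoms (rs, d)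
      = some (rs', atoms.foldl (fun d a => pvVarsA a.1 a.2.toList d) d) := by
  induction atoms generalizing rs d with
  | nil => exact ⟨rs, rfl⟩
  | cons a rest ih =>
    obtain ⟨r, vs⟩ := a
    simp only [pvDupScan] at h
    simp only [pvClauseA]
    split
    · simp_all
    · rename_i hc
      rw [if_neg hc] at h
      exact ih _ _ h

-- A's per-atom dict update is B's (the if-in/else of A is Dict.modify)
lemma pvVarsA_eq (r : String) (cs : List Char) (d) :
    pvVarsA r cs d
      = cs.foldl (fun d c =>
          if c ≠ '#' then d.modify c PySem.Set.empty (fun s => PySem.Set.add s r) else d) d := by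
  unfold pvVarsA
  congr 1
  funext d c
  by_cases h : c = '#'
  · simp [h]
  · simp only [h, if_false, ne_eq, not_false_iff, if_true]
    by_cases hc : d.contains c
    · simp [hc]
    · simp [hc, PySem.Dict.modify, PySem.Dict.getD_of_not_contains _ _ (by simpa using hc)]

lemma pvBuild_eq (atoms : List (String × String)) :
    atoms.foldl (fun d a => pvVarsA a.1 a.2.toList d) PySem.Dict.empty = pvBuildDict atoms := by
  unfold pvBuildDict
  congr 1
  funext d a
  exact pvVarsA_eq a.1 a.2.toList d

-- flat char–relation pair list behind pvBuildDict
def pvCps (atoms : List (String × String)) : List (Char × String) :=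
  (atoms.flatMap (fun a => a.2.toList.map (fun c => (c, a.1)))).filter (fun p => p.1 ≠ '#')

lemma pvBuildDict_eq_flat (atoms : List (String × String)) :
    pvBuildDict atoms
      = (pvCps atoms).foldl
          (fun d p => d.modify p.1 PySem.Set.empty (fun s => PySem.Set.add s p.2))
          PySem.Dict.empty := by
  unfold pvBuildDict pvCps
  rw [List.foldl_filter, List.foldl_flatMap]
  congr 1
  funext d a
  rw [List.foldl_map]
  congr 1
  funext x y
  simp

lemma pvBuildDict_keys_nodup (atoms : List (String × String)) :
    (pvBuildDict atoms).keys.Nodup := by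
  rw [pvBuildDict_eq_flat]
  exact PySem.Dict.nodup_keys_foldl_modify_key (pvCps atoms)
    (fun p : Char × String => p.1) PySem.Set.empty
    (fun _ p s => PySem.Set.add s p.2) PySem.Dict.empty PySem.Dict.nodup_keys_empty

lemma pvBuildDict_getD_nodup (atoms : List (String × String)) (c : Char) :
    ((pvBuildDict atoms).getD c PySem.Set.empty).Nodup := by
  rw [pvBuildDict_eq_flat]
  generalize hd : (PySem.Dict.empty : PySem.Dict Char (PySem.Set String)) = d0
  have h0 : ∀ c, ((d0 : PySem.Dict Char (PySem.Set String)).getD c PySem.Set.empty).Nodup := by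
    subst hd; intro c; simp [PySem.Dict.getD_empty]
  clear hd
  induction pvCps atoms generalizing d0 with
  | nil => exact h0 c
  | cons p rest ih =>
    refine ih _ ?_
    intro c'
    rw [PySem.Dict.getD_modify]
    split
    · exact PySem.Set.nodup_add _ _ (h0 _)
    · exact h0 _

lemma pvBuildDict_values_nodup (atoms : List (String × String)) :
    ∀ s ∈ (pvBuildDict atoms).values, s.Nodup := by
  intro s hs
  rw [PySem.Dict.values_eq_map_keys _ (pvBuildDict_keys_nodup atoms) PySem.Set.empty] at hs
  obtain ⟨k, _, rfl⟩ := List.mem_map.mp hs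
  exact pvBuildDict_getD_nodup atoms k

-- pvByRel as a flat fold
def pvPrs (sets : List (PySem.Set String)) : List (String × PySem.Set String) :=
  sets.flatMap (fun s => s.map (fun r => (r, s)))

lemma pvByRel_eq_flat (sets : List (PySem.Set String)) :
    pvByRel sets
      = (pvPrs sets).foldl (fun b p => b.modify p.1 [] (fun g => g ++ [p.2]))
          PySem.Dict.empty := by
  unfold pvByRel pvPrs
  rw [List.foldl_flatMap]
  congr 1
  funext b s
  rw [List.foldl_map]

lemma pvByRel_getD (sets : List (PySem.Set String)) (hnd : ∀ s ∈ sets, s.Nodup) (r : String) :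
    (pvByRel sets).getD r [] = sets.filter (fun s => PySem.Set.contains s r) := by
  rw [pvByRel_eq_flat, PySem.Dict.getD_foldl_modify_append]
  simp only [PySem.Dict.getD_empty, List.nil_append]
  unfold pvPrs
  induction sets with
  | nil => simp
  | cons s rest ih =>
    simp only [List.flatMap_cons, List.filter_append, List.map_append, List.filter_cons]
    rw [ih (fun t ht => hnd t (List.mem_cons_of_mem _ ht))]
    have hs : s.Nodup := hnd s List.mem_cons_self
    have hmap : ((s.map (fun r' => (r', s))).filter (fun p => p.1 == r)).map (fun p => p.2)
        = if PySem.Set.contains s r then [s] else [] := by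
      rw [List.filter_map]
      have : ((fun p => p.1 == r) ∘ (fun r' => ((r', s) : String × PySem.Set String)))
          = fun r' => r' == r := rfl
      rw [this, List.filter_beq]
      by_cases hm : r ∈ s
      · rw [List.count_eq_one_of_mem hs hm]
        simp [hm, PySem.Set.contains_eq_listContains, List.contains_eq_mem]
      · rw [List.count_eq_zero_of_not_mem hm]
        simp [hm, PySem.Set.contains_eq_listContains, List.contains_eq_mem]
    rw [hmap]
    simp only [PySem.Set.contains_eq_listContains, List.contains_eq_mem] at *
    by_cases hc : r ∈ s
    · simp [hc]
    · simp [hc]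

lemma pvByRel_keys (sets : List (PySem.Set String)) :
    (pvByRel sets).keys = PySem.Set.ofList ((pvPrs sets).map (fun p => p.1)) := by
  rw [pvByRel_eq_flat]
  rw [PySem.Dict.keys_foldl_modify_key]
  simp [PySem.Dict.keys_empty, PySem.Set.update_nil_left]

lemma pvByRel_keys_nodup (sets : List (PySem.Set String)) : (pvByRel sets).keys.Nodup := by
  rw [pvByRel_keys]; exact PySem.Set.nodup_ofList _

lemma pvMem_byRel_keys (sets : List (PySem.Set String)) (r : String) :
    r ∈ (pvByRel sets).keys ↔ ∃ s ∈ sets, r ∈ s := by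
  rw [pvByRel_keys]
  simp [PySem.Set.mem_ofList, pvPrs, List.mem_flatMap]

-- B's final loop = the ∀-over-relations chain condition
lemma pvAltCheck_iff (sets : List (PySem.Set String)) (hnd : ∀ s ∈ sets, s.Nodup) :
    (pvByRel sets).values.all pvChainOK = true
      ↔ ∀ r : String, pvChainOK (sets.filter (fun s => PySem.Set.contains s r)) = true := by
  rw [PySem.Dict.values_eq_map_keys _ (pvByRel_keys_nodup sets) []]
  simp only [List.all_eq_true, List.mem_map]
  constructor
  · intro h r
    by_cases hk : r ∈ (pvByRel sets).keys
    · have := h _ ⟨r, hk, rfl⟩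
      rwa [pvByRel_getD sets hnd r] at this
    · have hfil : sets.filter (fun s => PySem.Set.contains s r) = [] := by
        rw [List.filter_eq_nil_iff]
        intro s hs
        simp only [pvMem_byRel_keys, not_exists] at hk
        have := hk s
        simp only [hs, true_and] at this
        simpa [PySem.Set.contains_iff] using this
      rw [hfil]; rfl
  · rintro h g ⟨r, _, rfl⟩
    rw [pvByRel_getD sets hnd r]
    exact h r

-- zip-adjacent ⊆ checks ⟺ Pairwise ⊆ (chains are transitive)
lemma pvZipAll_iff (gs : List (PySem.Set String)) :
    ((gs.zip gs.tail).all (fun p => PySem.Set.issubset p.1 p.2) = true)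
      ↔ List.Pairwise (fun a b : PySem.Set String => a ⊆ b) gs := by
  induction gs with
  | nil => simp
  | cons a t ih =>
    cases t with
    | nil => simp
    | cons b t' =>
      rw [List.pairwise_cons]
      constructor
      · intro h
        simp only [List.tail_cons, List.zip_cons_cons, List.all_cons, Bool.and_eq_true] at h
        obtain ⟨hab, hrest⟩ := h
        have hp : List.Pairwise (fun a b : PySem.Set String => a ⊆ b) (b :: t') :=
          ih.mp (by simpa using hrest)
        have hsub : a ⊆ b := (PySem.Set.issubset_iff a b).mp hab
        refine ⟨?_, hp⟩
        intro x hx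
        rcases List.mem_cons.mp hx with rfl | hx'
        · exact hsub
        · exact hsub.trans ((List.pairwise_cons.mp hp).1 x hx')
      · rintro ⟨hall, hp⟩
        simp only [List.tail_cons, List.zip_cons_cons, List.all_cons, Bool.and_eq_true]
        exact ⟨(PySem.Set.issubset_iff a b).mpr (hall b List.mem_cons_self), ih.mpr hp⟩

lemma pvComp_symm : ∀ {s t : PySem.Set String}, pvComp s t → pvComp t s := by
  rintro s t (h | h)
  · exact Or.inr h
  · exact Or.inl h

-- the heart: all-pairs nested-or-disjoint ⟺ per-relation chains
lemma pvMain (L : List (PySem.Set String)) (hnd : ∀ s ∈ L, s.Nodup) :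
    List.Pairwise (fun s t => pvPairOK s t = true) L
      ↔ ∀ r : String, pvChainOK (L.filter (fun s => PySem.Set.contains s r)) = true := by
  constructor
  · intro hp r
    unfold pvChainOK
    set G := L.filter (fun s => PySem.Set.contains s r) with hG
    set gs := PySem.List.sorted G (fun s => PySem.Set.len s) false with hgs
    rw [pvZipAll_iff]
    have hmemG : ∀ s ∈ G, r ∈ s := by
      intro s hs
      have := (List.mem_filter.mp hs).2
      simpa [PySem.Set.contains_iff] using this
    have hGsub : ∀ s ∈ G, s ∈ L := fun s hs => (List.mem_filter.mp hs).1
    have hpG : List.Pairwise (fun s t => pvPairOK s t = true) G := hp.filter _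
    have hcomp : List.Pairwise pvComp G := by
      refine hpG.imp_of_mem ?_
      intro s t hs ht hok
      unfold pvPairOK at hok
      simp only [Bool.or_eq_true] at hok
      rcases hok with (h | h) | h
      · exact Or.inl ((PySem.Set.issubset_iff _ _).mp h)
      · exact Or.inr ((PySem.Set.issubset_iff _ _).mp h)
      · exact absurd (hmemG t ht) ((PySem.Set.isdisjoint_iff _ _).mp h r (hmemG s hs))
    have hperm : gs.Perm G := PySem.List.sorted_perm G _ false
    have hcompgs : List.Pairwise pvComp gs :=
      ((hperm.pairwise_iff (fun h => pvComp_symm h)).mpr hcomp)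
    have hlen : List.Pairwise (fun a b : PySem.Set String =>
        PySem.Set.len a ≤ PySem.Set.len b) gs := PySem.List.sorted_pairwise G _
    have hand := hcompgs.and hlen
    refine hand.imp_of_mem ?_
    intro a b ha hb hab
    rcases hab.1 with h | h
    · exact h
    · -- b ⊆ a together with len a ≤ len b forces a ~ b
      have hbn : b.Nodup := hnd b (hGsub b (hperm.subset hb))
      have hsp : b.Subperm a := hbn.subperm h
      have hlen' : a.length ≤ b.length := by
        have h2 := hab.2
        simp only [PySem.Set.len] at h2
        exact_mod_cast h2
      exact ((hsp.perm_of_length_le hlen').symm).subset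
  · intro h
    rw [List.pairwise_iff_forall_sublist]
    intro s t hsub
    unfold pvPairOK
    simp only [Bool.or_eq_true]
    by_cases hd : PySem.Set.isdisjoint s t = true
    · exact Or.inr hd
    · left
      rw [PySem.Set.isdisjoint_iff] at hd
      push Not at hd
      obtain ⟨r, hrs, hrt⟩ := hd
      have hcontain : ∀ u, r ∈ u → PySem.Set.contains u r = true := by
        intro u hu; exact (PySem.Set.contains_iff _ _).mpr hu
      have hsL : s ∈ L := hsub.subset List.mem_cons_self
      have htL : t ∈ L := hsub.subset (List.mem_cons_of_mem _ List.mem_cons_self)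
      set G := L.filter (fun u => PySem.Set.contains u r) with hG
      have hsG : s ∈ G := List.mem_filter.mpr ⟨hsL, hcontain s hrs⟩
      have htG : t ∈ G := List.mem_filter.mpr ⟨htL, hcontain t hrt⟩
      have hch := h r
      unfold pvChainOK at hch
      rw [pvZipAll_iff] at hch
      set gs := PySem.List.sorted G (fun u => PySem.Set.len u) false with hgs
      have hsgs : s ∈ gs := (PySem.List.mem_sorted G _ false s).mpr hsG
      have htgs : t ∈ gs := (PySem.List.mem_sorted G _ false t).mpr htG
      have hcomp : List.Pairwise pvComp gs := hch.imp (fun h => Or.inl h)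
      by_cases he : s = t
      · subst he
        exact Or.inl ((PySem.Set.issubset_iff s s).mpr (fun x hx => hx))
      · have := hcomp.forall (fun {a b} => pvComp_symm) hsgs htgs he
        rcases this with h' | h'
        · exact Or.inl ((PySem.Set.issubset_iff _ _).mpr h')
        · exact Or.inr ((PySem.Set.issubset_iff _ _).mpr h')

-- ===== VERDICT (by name: the statement is the Claim_ definition above) =====
theorem check_hiech_spec : Claim_equal_check_hiech := by
  intro q _
  unfold Spec_check_hiech check_hiech check_hiech_alt
  rw [pvFoldA_eq]
  set atoms := q.flatMap (fun clause => clause) with hatoms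
  by_cases hdup : pvDupScan atoms PySem.Set.empty = true
  · rw [(pvClauseA_none_iff atoms PySem.Set.empty PySem.Dict.empty).mpr hdup]
    simp only [hdup, if_true]
  · rw [Bool.not_eq_true] at hdup
    obtain ⟨rs', heq⟩ := pvClauseA_some atoms PySem.Set.empty PySem.Dict.empty hdup
    rw [heq, pvBuild_eq]
    simp only [hdup, if_false, Bool.false_eq_true]
    set sets := (pvBuildDict atoms).values with hsets
    have hnd : ∀ s ∈ sets, s.Nodup := pvBuildDict_values_nodup atoms
    have hiff : pvPairsLoop sets = true ↔ (pvByRel sets).values.all pvChainOK = true :=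
      (pvPairsLoop_iff sets).trans ((pvMain sets hnd).trans (pvAltCheck_iff sets hnd).symm)
    cases hx : pvPairsLoop sets
    · cases hy : (pvByRel sets).values.all pvChainOK
      · rfl
      · exact absurd (hiff.mpr hy) (by simp [hx])
    · exact (hiff.mp hx).symm
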